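-- pv_equiv track=rewrite | github.com/sambergin/OldWork | final.py | analyze_transposex
-- ===== SOURCE A (Python) =====
-- def analyze_transposex(plaintext):
--     if type(plaintext) != str:
--         return -1
--     if len(plaintext) == 0:
--         return 0
--
--     keydomain = 0
--     i = 0
--     flag = 0
--
--     same = plaintext[0]
--     for i in range(len(plaintext)):
--         if plaintext[i] != same:
--             flag = 1
--
--     if plaintext[len(plaintext)-1] == "Q" and flag == 1:
--         for i in range(2,len(plaintext)):
--             if len(plaintext) % i == 0:
--                 keydomain += 1
--
--
--     elif flag == 0 and plaintext[len(plaintext)-1] == "Q":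
--         return 0
--
--     elif flag == 0:
--         for i in range(2,len(plaintext)):
--             if len(plaintext) % i != 0:
--                 keydomain += 1
--
--
--     else:
--         for i in range(2,len(plaintext)):
--             keydomain += 1
--     return keydomain
-- ===== SOURCE B (Python) =====
-- def analyze_transposex(plaintext):
--     if type(plaintext) != str:
--         return -1
--     n = len(plaintext)
--     if n <= 2:
--         return 0
--     d = 0
--     i = 2
--     while i * i <= n:
--         if n % i == 0:
--             d += 1 if i * i == n else 2
--         i += 1
--     uniform = plaintext.count(plaintext[0]) == n
--     if plaintext[-1] == "Q":
--         return 0 if uniform else d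
--     return (n - 2) - d if uniform else n - 2
-- ===== Notes on version B (the rewrite author's own statement) =====
-- stated objective: faster
-- what changed: Replaces the O(n) character-uniformity loop and the three O(n) scans over range(2,n) by a sqrt(n) divisor-pair loop, with the non-divisor and all-count branches obtained as closed forms (n-2)-d and n-2.
import Mathlib
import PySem

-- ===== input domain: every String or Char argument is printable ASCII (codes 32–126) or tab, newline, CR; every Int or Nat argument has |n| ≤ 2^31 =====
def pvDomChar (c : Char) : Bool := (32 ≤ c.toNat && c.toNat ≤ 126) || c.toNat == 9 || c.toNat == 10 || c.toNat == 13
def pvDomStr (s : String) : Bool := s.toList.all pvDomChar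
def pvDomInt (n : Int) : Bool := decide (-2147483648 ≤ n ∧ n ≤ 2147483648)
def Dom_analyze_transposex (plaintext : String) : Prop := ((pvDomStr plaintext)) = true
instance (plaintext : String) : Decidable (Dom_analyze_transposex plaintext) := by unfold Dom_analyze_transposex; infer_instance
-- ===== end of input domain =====

-- B replaces A's three linear scans over range(2,n) by a sqrt(n) divisor-pair loop plus
-- closed forms (n-2)-d and n-2 (objective: faster divisor counting).

-- ===== PORT A =====
-- Literal transliteration of A: flag loop over the characters, last-character test,
-- and the three foldl loops over range(2, n) (= List.range' 2 (n-2)).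
def analyze_transposex (plaintext : String) : Int :=
  let cs := plaintext.toList
  if cs.length = 0 then 0
  else
    let same := cs.headD ' '
    let flag : Nat := cs.foldl (fun fl x => if x ≠ same then 1 else fl) 0
    let last := cs.getLastD ' '
    let n := cs.length
    if last = 'Q' ∧ flag = 1 then
      ((List.range' 2 (n - 2)).foldl (fun k i => if n % i = 0 then k + 1 else k) (0 : Nat) : Nat)
    else if flag = 0 ∧ last = 'Q' then 0
    else if flag = 0 then
      ((List.range' 2 (n - 2)).foldl (fun k i => if ¬ (n % i = 0) then k + 1 else k) (0 : Nat) : Nat)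
    else
      ((List.range' 2 (n - 2)).foldl (fun k _ => k + 1) (0 : Nat) : Nat)

-- ===== PORT B =====
-- B's while loop: i from 2 while i*i ≤ n, counting the divisor pair {i, n/i}.
def pvPairLoop (n i : Nat) : Nat :=
  if i * i ≤ n then
    (if n % i = 0 then (if i * i = n then 1 else 2) else 0) + pvPairLoop n (i + 1)
  else 0
termination_by n + 1 - i
decreasing_by
  rcases Nat.eq_zero_or_pos i with h0 | h1
  · omega
  · have : i ≤ i * i := Nat.le_mul_of_pos_left i h1
    omega

def analyze_transposex_alt (plaintext : String) : Int :=
  let cs := plaintext.toList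
  let n := cs.length
  if n ≤ 2 then 0
  else
    let d : Nat := pvPairLoop n 2
    let uniform := cs.count (cs.headD ' ') = n
    if cs.getLastD ' ' = 'Q' then (if uniform then 0 else (d : Int))
    else (if uniform then (n : Int) - 2 - (d : Int) else (n : Int) - 2)

-- ===== PRECONDITION & SPEC =====
def Spec_analyze_transposex (plaintext : String) (out : Int) : Prop := out = analyze_transposex_alt plaintext
instance (plaintext : String) (out : Int) : Decidable (Spec_analyze_transposex plaintext out) := by unfold Spec_analyze_transposex; infer_instance

-- ===== CLAIM (what is proved, stated in full; the proofs are below) =====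
def Claim_equal_analyze_transposex : Prop := ∀ (plaintext : String), Dom_analyze_transposex plaintext → Spec_analyze_transposex plaintext (analyze_transposex plaintext)

-- ===== LEMMAS AND PROOFS =====

-- foldl of a conditional counter = countP
theorem pv_foldl_countP (p : Nat → Prop) [DecidablePred p] (l : List Nat) (a : Nat) :
    l.foldl (fun k i => if p i then k + 1 else k) a = a + l.countP (fun i => decide (p i)) := by
  induction l generalizing a with
  | nil => simp
  | cons x t ih =>
    by_cases h : p x
    · simp [h, ih]; omega
    · simp [h, ih]

-- foldl of an unconditional counter = length
theorem pv_foldl_len (l : List Nat) (a : Nat) :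
    l.foldl (fun k (_ : Nat) => k + 1) a = a + l.length := by
  induction l generalizing a with
  | nil => simp
  | cons x t ih => simp [ih]; omega

-- countP over range' = card of the filtered Ico
theorem pv_countP_range' (p : Nat → Prop) [DecidablePred p] (a k : Nat) :
    (List.range' a k).countP (fun i => decide (p i)) =
      ((Finset.Ico a (a + k)).filter p).card := by
  induction k with
  | zero => simp
  | succ k ih =>
    rw [List.range'_concat, List.countP_append,
        show a + (k + 1) = (a + k) + 1 from rfl,
        Nat.Ico_succ_right_eq_insert_Ico (by omega), Finset.filter_insert]
    by_cases h : p (a + k)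
    · rw [if_pos h, Finset.card_insert_of_notMem (by simp)]
      simp [h, ih]
    · rw [if_neg h]
      simp [h, ih]

-- the invariant predicate for the pair loop
abbrev pvQ (n i d : Nat) : Prop :=
  n % d = 0 ∧ ((d * d ≤ n ∧ i ≤ d) ∨ (n < d * d ∧ i ≤ n / d))

theorem pvQ_empty (n i : Nat) (h : ¬ i * i ≤ n) :
    (Finset.Ico 2 n).filter (pvQ n i) = ∅ := by
  apply Finset.filter_eq_empty_iff.mpr
  intro d hd
  simp only [Finset.mem_Ico] at hd
  rintro ⟨hmod, hc | hc⟩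
  · have : i * i ≤ d * d := Nat.mul_le_mul hc.2 hc.2
    omega
  · have hdvd : (n / d) * d = n := Nat.div_mul_cancel (Nat.dvd_of_mod_eq_zero hmod)
    have hlt : n / d < d := by
      by_contra hge
      have : d * d ≤ (n / d) * d := Nat.mul_le_mul (by omega) (le_refl d)
      omega
    have h1 : i * i ≤ (n / d) * (n / d) := Nat.mul_le_mul hc.2 hc.2
    have h2 : (n / d) * (n / d) ≤ (n / d) * d := Nat.mul_le_mul (le_refl _) (by omega)
    omega

theorem pvQ_step (n i : Nat) (h2 : 2 ≤ i) (hle : i * i ≤ n) :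
    ((Finset.Ico 2 n).filter (pvQ n i)).card =
      (if n % i = 0 then (if i * i = n then 1 else 2) else 0) +
        ((Finset.Ico 2 n).filter (pvQ n (i + 1))).card := by
  have hin : i < n := by
    have : 2 * i ≤ i * i := Nat.mul_le_mul_right i h2
    omega
  -- split the filter
  have hsplit : (Finset.Ico 2 n).filter (pvQ n i) =
      ((Finset.Ico 2 n).filter (pvQ n (i + 1))) ∪
      ((Finset.Ico 2 n).filter (fun d =>
        n % d = 0 ∧ ((d * d ≤ n ∧ d = i) ∨ (n < d * d ∧ n / d = i)))) := by
    rw [← Finset.filter_or]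
    apply Finset.filter_congr
    intro d hd
    simp only [Finset.mem_Ico] at hd
    unfold pvQ
    constructor
    · rintro ⟨hmod, hc | hc⟩
      · rcases Nat.lt_or_ge i d with hlt | hge
        · exact Or.inl ⟨hmod, Or.inl ⟨hc.1, hlt⟩⟩
        · exact Or.inr ⟨hmod, Or.inl ⟨hc.1, by omega⟩⟩
      · rcases Nat.lt_or_ge i (n / d) with hlt | hge
        · exact Or.inl ⟨hmod, Or.inr ⟨hc.1, hlt⟩⟩
        · exact Or.inr ⟨hmod, Or.inr ⟨hc.1, by omega⟩⟩
    · rintro (⟨hmod, hc | hc⟩ | ⟨hmod, hc | hc⟩)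
      · exact ⟨hmod, Or.inl ⟨hc.1, by omega⟩⟩
      · exact ⟨hmod, Or.inr ⟨hc.1, by omega⟩⟩
      · exact ⟨hmod, Or.inl ⟨hc.1, by omega⟩⟩
      · exact ⟨hmod, Or.inr ⟨hc.1, by omega⟩⟩
  rw [hsplit, Finset.card_union_of_disjoint]
  · -- compute the card of the "new elements" set
    have hnew : ((Finset.Ico 2 n).filter (fun d =>
        n % d = 0 ∧ ((d * d ≤ n ∧ d = i) ∨ (n < d * d ∧ n / d = i)))).card =
        (if n % i = 0 then (if i * i = n then 1 else 2) else 0) := by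
      by_cases hmi : n % i = 0
      · have hdvd : (n / i) * i = n := Nat.div_mul_cancel (Nat.dvd_of_mod_eq_zero hmi)
        by_cases hsq : i * i = n
        · have : (Finset.Ico 2 n).filter (fun d =>
              n % d = 0 ∧ ((d * d ≤ n ∧ d = i) ∨ (n < d * d ∧ n / d = i))) = {i} := by
            apply Finset.ext
            intro d
            simp only [Finset.mem_filter, Finset.mem_Ico, Finset.mem_singleton]
            constructor
            · rintro ⟨⟨h2d, hdn⟩, hmod, hc | hc⟩
              · exact hc.2
              · exfalso
                have hdd : (n / d) * d = n := Nat.div_mul_cancel (Nat.dvd_of_mod_eq_zero hmod)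
                have hdi : d * i = n := by
                  rw [← hc.2, Nat.mul_comm]; exact hdd
                have : d = i := Nat.eq_of_mul_eq_mul_right (by omega) (by omega : d * i = i * i)
                subst this
                omega
            · rintro rfl
              exact ⟨⟨h2, hin⟩, hmi, Or.inl ⟨by omega, rfl⟩⟩
          rw [this]; simp [hmi, hsq]
        · have hq2 : i < n / i := by
            by_contra hge
            have : (n / i) * i ≤ i * i := Nat.mul_le_mul (by omega) (le_refl i)
            omega
          have hqn : n / i < n := by
            have : (n / i) * 2 ≤ (n / i) * i := Nat.mul_le_mul (le_refl _) h2
            omega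
          have : (Finset.Ico 2 n).filter (fun d =>
              n % d = 0 ∧ ((d * d ≤ n ∧ d = i) ∨ (n < d * d ∧ n / d = i))) = {i, n / i} := by
            apply Finset.ext
            intro d
            simp only [Finset.mem_filter, Finset.mem_Ico, Finset.mem_insert, Finset.mem_singleton]
            constructor
            · rintro ⟨⟨h2d, hdn⟩, hmod, hc | hc⟩
              · exact Or.inl hc.2
              · have hdd : (n / d) * d = n := Nat.div_mul_cancel (Nat.dvd_of_mod_eq_zero hmod)
                have hdi : d * i = n := by
                  rw [← hc.2, Nat.mul_comm]; exact hdd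
                have : d = n / i := Nat.eq_of_mul_eq_mul_right (by omega)
                  (by omega : d * i = (n / i) * i)
                exact Or.inr this
            · rintro (rfl | rfl)
              · exact ⟨⟨h2, hin⟩, hmi, Or.inl ⟨hle, rfl⟩⟩
              · have hsq' : n < (n / i) * (n / i) := by
                  have : (n / i) * i < (n / i) * (n / i) :=
                    mul_lt_mul_of_pos_left hq2 (by omega)
                  omega
                refine ⟨⟨by omega, hqn⟩, ?_, Or.inr ⟨hsq', ?_⟩⟩
                · exact Nat.mod_eq_zero_of_dvd (Nat.div_dvd_of_dvd (Nat.dvd_of_mod_eq_zero hmi))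
                · exact Nat.div_div_self (Nat.dvd_of_mod_eq_zero hmi) (by omega)
          rw [this]
          rw [Finset.card_insert_of_notMem (by simp; omega)]
          simp [hmi, hsq]
      · have : (Finset.Ico 2 n).filter (fun d =>
            n % d = 0 ∧ ((d * d ≤ n ∧ d = i) ∨ (n < d * d ∧ n / d = i))) = ∅ := by
          apply Finset.filter_eq_empty_iff.mpr
          intro d hd
          simp only [Finset.mem_Ico] at hd
          rintro ⟨hmod, hc | hc⟩
          · exact hmi (hc.2 ▸ hmod)
          · have hdd : (n / d) * d = n := Nat.div_mul_cancel (Nat.dvd_of_mod_eq_zero hmod)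
            have hdi : i * d = n := by rw [← hc.2]; exact hdd
            exact hmi (Nat.mod_eq_zero_of_dvd ⟨d, hdi.symm⟩)
        rw [this]; simp [hmi]
    omega
  · -- disjointness
    rw [Finset.disjoint_left]
    intro d hd1 hd2
    simp only [Finset.mem_filter, Finset.mem_Ico] at hd1 hd2
    obtain ⟨_, _, hc1 | hc1⟩ := hd1 <;> obtain ⟨_, _, hc2 | hc2⟩ := hd2 <;> omega

theorem pvPairLoop_eq_card (n : Nat) :
    ∀ k i, n + 1 - i ≤ k → 2 ≤ i →
      pvPairLoop n i = ((Finset.Ico 2 n).filter (pvQ n i)).card := by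
  intro k
  induction k with
  | zero =>
    intro i hk h2
    have hgt : ¬ i * i ≤ n := by
      intro hle
      have : i ≤ i * i := Nat.le_mul_of_pos_left i (by omega)
      omega
    rw [pvPairLoop, if_neg hgt, pvQ_empty n i hgt]
    simp
  | succ k ih =>
    intro i hk h2
    rw [pvPairLoop]
    by_cases hle : i * i ≤ n
    · have hin : i ≤ n := by
        have : i ≤ i * i := Nat.le_mul_of_pos_left i (by omega)
        omega
      rw [if_pos hle, pvQ_step n i h2 hle, ih (i + 1) (by omega) (by omega)]
    · rw [if_neg hle, pvQ_empty n i hle]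
      simp

-- the crux: the sqrt pair loop counts the proper divisors in (1, n)
theorem pv_crux (n : Nat) :
    pvPairLoop n 2 = ((Finset.Ico 2 n).filter (fun d => n % d = 0)).card := by
  rw [pvPairLoop_eq_card n (n + 1) 2 (by omega) le_rfl]
  congr 1
  apply Finset.filter_congr
  intro d hd
  simp only [Finset.mem_Ico] at hd
  unfold pvQ
  constructor
  · rintro ⟨hmod, _⟩; exact hmod
  · intro hmod
    refine ⟨hmod, ?_⟩
    rcases Nat.lt_or_ge n (d * d) with hlt | hge
    · have hdd : (n / d) * d = n := Nat.div_mul_cancel (Nat.dvd_of_mod_eq_zero hmod)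
      have hne0 : n / d ≠ 0 := by
        intro h0; rw [h0, Nat.zero_mul] at hdd; omega
      have hne1 : n / d ≠ 1 := by
        intro h1; rw [h1, Nat.one_mul] at hdd; omega
      have h2q : 2 ≤ n / d := by
        generalize n / d = q at hne0 hne1
        omega
      exact Or.inr ⟨hlt, h2q⟩
    · exact Or.inl ⟨hge, hd.1⟩

-- the flag loop returns 0 iff every character equals the first
theorem pv_flag (same : Char) (cs : List Char) (a : Nat) :
    cs.foldl (fun fl x => if x ≠ same then 1 else fl) a =
      if ∀ x ∈ cs, x = same then a else 1 := by
  induction cs generalizing a with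
  | nil => simp
  | cons c t ih =>
    rw [List.foldl_cons]
    by_cases hc : c = same
    · rw [if_neg (fun h => h hc), ih]
      have hiff : (∀ x ∈ c :: t, x = same) ↔ (∀ x ∈ t, x = same) := by
        constructor
        · intro h x hx
          exact h x (List.mem_cons_of_mem c hx)
        · intro h x hx
          rcases List.mem_cons.mp hx with rfl | hx
          · exact hc
          · exact h x hx
      rw [if_congr hiff rfl rfl]
    · rw [if_pos hc, ih]
      have hnot : ¬ ∀ x ∈ c :: t, x = same := fun h => hc (h c (List.mem_cons.mpr (Or.inl rfl)))
      rw [if_neg hnot]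
      by_cases ht : ∀ x ∈ t, x = same
      · rw [if_pos ht]
      · rw [if_neg ht]

theorem pv_d_le (n : Nat) : pvPairLoop n 2 ≤ n - 2 := by
  rw [pv_crux]
  calc ((Finset.Ico 2 n).filter (fun d => n % d = 0)).card
      ≤ (Finset.Ico 2 n).card := Finset.card_filter_le _ _
    _ = n - 2 := Nat.card_Ico 2 n

-- ===== VERDICT (by name: the statement is the Claim_ definition above) =====
theorem analyze_transposex_spec : Claim_equal_analyze_transposex := by
  intro p _
  unfold Spec_analyze_transposex
  simp only [analyze_transposex, analyze_transposex_alt]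
  set cs := p.toList with hcs
  set same := cs.headD ' ' with hsame
  set last := cs.getLastD ' ' with hlast
  rw [pv_flag same cs 0]
  have hcount : (cs.count same = cs.length) ↔ (∀ x ∈ cs, x = same) := by
    rw [List.count_eq_length]
    constructor
    · intro h x hx
      exact (h x hx).symm
    · intro h x hx
      exact (h x hx).symm
  by_cases hnil : cs.length = 0
  · simp [hnil]
  · rw [if_neg hnil]
    by_cases hsmall : cs.length ≤ 2
    · rw [if_pos hsmall]
      have hr : cs.length - 2 = 0 := by omega
      rw [hr]
      split_ifs <;> rfl
    · rw [if_neg hsmall]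
      have hda : pvPairLoop cs.length 2 ≤ cs.length - 2 := pv_d_le cs.length
      have hdiv : (List.range' 2 (cs.length - 2)).foldl
          (fun k i => if cs.length % i = 0 then k + 1 else k) (0 : Nat) =
          pvPairLoop cs.length 2 := by
        rw [pv_foldl_countP (fun i => cs.length % i = 0), pv_countP_range',
            show 2 + (cs.length - 2) = cs.length from by omega, pv_crux]
        exact Nat.zero_add _
      have hnondiv : (List.range' 2 (cs.length - 2)).foldl
          (fun k i => if ¬ (cs.length % i = 0) then k + 1 else k) (0 : Nat) =
          (cs.length - 2) - pvPairLoop cs.length 2 := by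
        rw [pv_foldl_countP (fun i => ¬ (cs.length % i = 0)), pv_countP_range',
            show 2 + (cs.length - 2) = cs.length from by omega, pv_crux]
        have hpm := Finset.card_filter_add_card_filter_not
          (s := Finset.Ico 2 cs.length) (p := fun d => cs.length % d = 0)
        have hic : (Finset.Ico 2 cs.length).card = cs.length - 2 := Nat.card_Ico 2 cs.length
        omega
      have hall' : (List.range' 2 (cs.length - 2)).foldl
          (fun k (_ : Nat) => k + 1) (0 : Nat) = cs.length - 2 := by
        rw [pv_foldl_len, List.length_range']
        omega
      by_cases hall : ∀ x ∈ cs, x = same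
      · have hu : cs.count same = cs.length := hcount.mpr hall
        rw [if_pos hall]
        by_cases hq : last = 'Q'
        · rw [if_neg (show ¬(last = 'Q' ∧ (0 : Nat) = 1) by simp),
              if_pos (show (0 : Nat) = 0 ∧ last = 'Q' from ⟨rfl, hq⟩),
              if_pos hq, if_pos hu]
        · rw [if_neg (show ¬(last = 'Q' ∧ (0 : Nat) = 1) by simp [hq]),
              if_neg (show ¬((0 : Nat) = 0 ∧ last = 'Q') by simp [hq]),
              if_pos (show (0 : Nat) = 0 from rfl),
              if_neg hq, if_pos hu, hnondiv]
          omega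
      · have hu : ¬ cs.count same = cs.length := fun h => hall (hcount.mp h)
        rw [if_neg hall]
        by_cases hq : last = 'Q'
        · rw [if_pos (show last = 'Q' ∧ (1 : Nat) = 1 from ⟨hq, rfl⟩),
              if_pos hq, if_neg hu, hdiv]
        · rw [if_neg (show ¬(last = 'Q' ∧ (1 : Nat) = 1) by simp [hq]),
              if_neg (show ¬((1 : Nat) = 0 ∧ last = 'Q') by simp),
              if_neg (show ¬((1 : Nat) = 0) by simp),
              if_neg hq, if_neg hu, hall']
          omega
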